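-- pv_equiv track=rewrite | github.com/YenAle-FT-Gmail/YenSense.AI | src/pipeline/stages/gap_identification.py | _categorize_questions
-- ===== SOURCE A (Python) =====
-- from typing import List
--
-- def _categorize_questions(questions: List[str]) -> dict:
--     """Categorize questions by type"""
--     categories = {
--         'policy': 0,
--         'technical': 0,
--         'fundamental': 0,
--         'positioning': 0,
--         'risk': 0,
--         'other': 0
--     }
--
--     for q in questions:
--         q_lower = q.lower()
--         if 'boj' in q_lower or 'policy' in q_lower or 'central bank' in q_lower:
--             categories['policy'] += 1
--         elif 'level' in q_lower or 'resistance' in q_lower or 'support' in q_lower: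
--             categories['technical'] += 1
--         elif 'economy' in q_lower or 'gdp' in q_lower or 'inflation' in q_lower:
--             categories['fundamental'] += 1
--         elif 'position' in q_lower or 'flow' in q_lower or 'sentiment' in q_lower:
--             categories['positioning'] += 1
--         elif 'risk' in q_lower or 'tail' in q_lower or 'hedge' in q_lower:
--             categories['risk'] += 1
--         else:
--             categories['other'] += 1
--
--     return categories
-- ===== SOURCE B (Python) =====
-- from typing import List
--
-- _TABLE = [
--     ('policy', ('boj', 'policy', 'central bank')),
--     ('technical', ('level', 'resistance', 'support')),
--     ('fundamental', ('economy', 'gdp', 'inflation')),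
--     ('positioning', ('position', 'flow', 'sentiment')),
--     ('risk', ('risk', 'tail', 'hedge')),
-- ]
--
--
-- def _sieve(table, remaining):
--     """Recursive sieve: each category takes (and removes) its matching questions."""
--     if not table:
--         return {'other': len(remaining)}
--     name, kws = table[0]
--     matched = [q for q in remaining if any(kw in q for kw in kws)]
--     rest = [q for q in remaining if not any(kw in q for kw in kws)]
--     out = {name: len(matched)}
--     out.update(_sieve(table[1:], rest))
--     return out
--
--
-- def _categorize_questions(questions: List[str]) -> dict:
--     """Categorize questions by type (sieve: per-category partition of a shrinking pool)."""
--     return _sieve(_TABLE, [q.lower() for q in questions])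
-- ===== Notes on version B (the rewrite author's own statement) =====
-- stated objective: alternative
-- what changed: Replaces the per-question elif cascade tallying into a dict with a recursive sieve over the category table: each category filters out and counts its matching questions from a shrinking pool, the leftover pool becomes 'other'; priority is enforced by removal instead of by branch order.
import Mathlib
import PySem

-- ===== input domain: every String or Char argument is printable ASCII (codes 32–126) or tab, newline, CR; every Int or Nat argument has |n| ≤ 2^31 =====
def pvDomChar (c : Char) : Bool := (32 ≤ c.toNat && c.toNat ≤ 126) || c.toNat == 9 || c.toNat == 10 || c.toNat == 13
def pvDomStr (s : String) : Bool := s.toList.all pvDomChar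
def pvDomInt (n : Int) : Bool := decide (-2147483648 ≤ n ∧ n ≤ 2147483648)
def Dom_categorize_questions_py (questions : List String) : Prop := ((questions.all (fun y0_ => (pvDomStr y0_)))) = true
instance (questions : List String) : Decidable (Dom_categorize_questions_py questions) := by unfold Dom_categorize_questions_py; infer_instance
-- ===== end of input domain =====

-- B replaces A's per-question elif cascade with a recursive per-category sieve over a shrinking pool of questions (alternative decomposition, same cost).

-- ===== PORT A =====
def categorize_questions_py (questions : List String) : List (String × Int) :=
  let categories : PySem.Dict String Int :=
    PySem.Dict.ofList
      [("policy", 0), ("technical", 0), ("fundamental", 0),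
       ("positioning", 0), ("risk", 0), ("other", 0)]
  (questions.foldl (fun d q =>
    let q_lower := PySem.Str.lower q
    if PySem.Str.isIn "boj" q_lower || PySem.Str.isIn "policy" q_lower || PySem.Str.isIn "central bank" q_lower then
      d.modify "policy" 0 (· + 1)
    else if PySem.Str.isIn "level" q_lower || PySem.Str.isIn "resistance" q_lower || PySem.Str.isIn "support" q_lower then
      d.modify "technical" 0 (· + 1)
    else if PySem.Str.isIn "economy" q_lower || PySem.Str.isIn "gdp" q_lower || PySem.Str.isIn "inflation" q_lower then
      d.modify "fundamental" 0 (· + 1)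
    else if PySem.Str.isIn "position" q_lower || PySem.Str.isIn "flow" q_lower || PySem.Str.isIn "sentiment" q_lower then
      d.modify "positioning" 0 (· + 1)
    else if PySem.Str.isIn "risk" q_lower || PySem.Str.isIn "tail" q_lower || PySem.Str.isIn "hedge" q_lower then
      d.modify "risk" 0 (· + 1)
    else
      d.modify "other" 0 (· + 1)) categories).items

-- ===== PORT B =====
-- the category → keywords table of Source B
def pvTable : List (String × List String) :=
  [("policy", ["boj", "policy", "central bank"]),
   ("technical", ["level", "resistance", "support"]),
   ("fundamental", ["economy", "gdp", "inflation"]),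
   ("positioning", ["position", "flow", "sentiment"]),
   ("risk", ["risk", "tail", "hedge"])]

-- recursive sieve (Source B's _sieve): each category takes (and removes) its matching questions
def pvSieve : List (String × List String) → List String → List (String × Int)
  | [], remaining => [("other", (remaining.length : Int))]
  | (name, kws) :: rest, remaining =>
      (name, ((remaining.filter (fun q => kws.any (fun kw => PySem.Str.isIn kw q))).length : Int))
        :: pvSieve rest (remaining.filter (fun q => !(kws.any (fun kw => PySem.Str.isIn kw q))))

def categorize_questions_py_alt (questions : List String) : List (String × Int) :=
  pvSieve pvTable (questions.map PySem.Str.lower)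

-- ===== PRECONDITION & SPEC =====
def Spec_categorize_questions_py (questions : List String) (out : List (String × Int)) : Prop := out = categorize_questions_py_alt questions
instance (questions : List String) (out : List (String × Int)) : Decidable (Spec_categorize_questions_py questions out) := by unfold Spec_categorize_questions_py; infer_instance

-- ===== CLAIM (what is proved, stated in full; the proofs are below) =====
def Claim_equal_categorize_questions_py : Prop := ∀ (questions : List String), Dom_categorize_questions_py questions → Spec_categorize_questions_py questions (categorize_questions_py questions)

-- ===== LEMMAS AND PROOFS =====

-- the initial dict of port A
def pvD0 : PySem.Dict String Int :=
  PySem.Dict.ofList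
    [("policy", 0), ("technical", 0), ("fundamental", 0),
     ("positioning", 0), ("risk", 0), ("other", 0)]

def pvCategoryNames : List String :=
  ["policy", "technical", "fundamental", "positioning", "risk", "other"]

-- the per-category match predicates, exactly pvSieve's filter tests on pvTable
def pvM1 (q : String) : Bool := ["boj", "policy", "central bank"].any (fun kw => PySem.Str.isIn kw q)
def pvM2 (q : String) : Bool := ["level", "resistance", "support"].any (fun kw => PySem.Str.isIn kw q)
def pvM3 (q : String) : Bool := ["economy", "gdp", "inflation"].any (fun kw => PySem.Str.isIn kw q)
def pvM4 (q : String) : Bool := ["position", "flow", "sentiment"].any (fun kw => PySem.Str.isIn kw q)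
def pvM5 (q : String) : Bool := ["risk", "tail", "hedge"].any (fun kw => PySem.Str.isIn kw q)

-- the label A's elif cascade assigns to a (lowered) question
def pvLabelL (ql : String) : String :=
  if pvM1 ql then "policy"
  else if pvM2 ql then "technical"
  else if pvM3 ql then "fundamental"
  else if pvM4 ql then "positioning"
  else if pvM5 ql then "risk"
  else "other"

-- A's elif cascade performs exactly one modify, keyed by the label of the lowered question
theorem pvStep_eq (d : PySem.Dict String Int) (q : String) :
    (let q_lower := PySem.Str.lower q
     if PySem.Str.isIn "boj" q_lower || PySem.Str.isIn "policy" q_lower || PySem.Str.isIn "central bank" q_lower then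
       d.modify "policy" 0 (· + 1)
     else if PySem.Str.isIn "level" q_lower || PySem.Str.isIn "resistance" q_lower || PySem.Str.isIn "support" q_lower then
       d.modify "technical" 0 (· + 1)
     else if PySem.Str.isIn "economy" q_lower || PySem.Str.isIn "gdp" q_lower || PySem.Str.isIn "inflation" q_lower then
       d.modify "fundamental" 0 (· + 1)
     else if PySem.Str.isIn "position" q_lower || PySem.Str.isIn "flow" q_lower || PySem.Str.isIn "sentiment" q_lower then
       d.modify "positioning" 0 (· + 1)
     else if PySem.Str.isIn "risk" q_lower || PySem.Str.isIn "tail" q_lower || PySem.Str.isIn "hedge" q_lower then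
       d.modify "risk" 0 (· + 1)
     else
       d.modify "other" 0 (· + 1)) = d.modify (pvLabelL (PySem.Str.lower q)) 0 (· + 1) := by
  have e1 : ∀ ql, (PySem.Str.isIn "boj" ql || PySem.Str.isIn "policy" ql || PySem.Str.isIn "central bank" ql) = pvM1 ql := by
    intro ql; simp [pvM1, Bool.or_assoc]
  have e2 : ∀ ql, (PySem.Str.isIn "level" ql || PySem.Str.isIn "resistance" ql || PySem.Str.isIn "support" ql) = pvM2 ql := by
    intro ql; simp [pvM2, Bool.or_assoc]
  have e3 : ∀ ql, (PySem.Str.isIn "economy" ql || PySem.Str.isIn "gdp" ql || PySem.Str.isIn "inflation" ql) = pvM3 ql := by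
    intro ql; simp [pvM3, Bool.or_assoc]
  have e4 : ∀ ql, (PySem.Str.isIn "position" ql || PySem.Str.isIn "flow" ql || PySem.Str.isIn "sentiment" ql) = pvM4 ql := by
    intro ql; simp [pvM4, Bool.or_assoc]
  have e5 : ∀ ql, (PySem.Str.isIn "risk" ql || PySem.Str.isIn "tail" ql || PySem.Str.isIn "hedge" ql) = pvM5 ql := by
    intro ql; simp [pvM5, Bool.or_assoc]
  simp only [e1, e2, e3, e4, e5]
  unfold pvLabelL
  split_ifs <;> rfl

theorem pvLabelL_contains (ql : String) :
    PySem.Set.contains pvCategoryNames (pvLabelL ql) = true := by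
  unfold pvLabelL
  split_ifs <;> decide

-- Set.update leaves a set unchanged when every new element is already present
theorem pvSet_update_of_subset {s : PySem.Set String} {xs : List String}
    (h : ∀ x ∈ xs, s.contains x = true) : PySem.Set.update s xs = s := by
  induction xs generalizing s with
  | nil => rfl
  | cons x xs ih =>
      have hx := h x (List.mem_cons_self)
      simp only [PySem.Set.update, List.foldl_cons, PySem.Set.add, hx, if_pos]
      exact ih (fun y hy => h y (List.mem_cons_of_mem _ hy))

-- A's result in canonical form: per-name counts of the cascade labels
theorem pvA_canon (questions : List String) :
    categorize_questions_py questions =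
      pvCategoryNames.map (fun k => (k, (((questions.map PySem.Str.lower).map pvLabelL).count k : Int))) := by
  unfold categorize_questions_py
  have hfold :
      (questions.foldl (fun d q =>
        let q_lower := PySem.Str.lower q
        if PySem.Str.isIn "boj" q_lower || PySem.Str.isIn "policy" q_lower || PySem.Str.isIn "central bank" q_lower then
          d.modify "policy" 0 (· + 1)
        else if PySem.Str.isIn "level" q_lower || PySem.Str.isIn "resistance" q_lower || PySem.Str.isIn "support" q_lower then
          d.modify "technical" 0 (· + 1)
        else if PySem.Str.isIn "economy" q_lower || PySem.Str.isIn "gdp" q_lower || PySem.Str.isIn "inflation" q_lower then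
          d.modify "fundamental" 0 (· + 1)
        else if PySem.Str.isIn "position" q_lower || PySem.Str.isIn "flow" q_lower || PySem.Str.isIn "sentiment" q_lower then
          d.modify "positioning" 0 (· + 1)
        else if PySem.Str.isIn "risk" q_lower || PySem.Str.isIn "tail" q_lower || PySem.Str.isIn "hedge" q_lower then
          d.modify "risk" 0 (· + 1)
        else
          d.modify "other" 0 (· + 1)) pvD0) =
      (((questions.map PySem.Str.lower).map pvLabelL).foldl (fun d y => d.modify y 0 (· + 1)) pvD0) := by
    rw [List.foldl_map, List.foldl_map]
    apply PySem.List.foldl_congr_mem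
    intro d q _
    exact pvStep_eq d q
  show (questions.foldl _ pvD0).items = _
  rw [hfold]
  set labels := (questions.map PySem.Str.lower).map pvLabelL with hlabels
  have hmem : ∀ x ∈ labels, PySem.Set.contains pvCategoryNames x = true := by
    intro x hx
    rw [hlabels] at hx
    obtain ⟨q, _, rfl⟩ := List.mem_map.1 hx
    exact pvLabelL_contains q
  have hkeys : (labels.foldl (fun d y => d.modify y 0 (· + 1)) pvD0).keys = pvCategoryNames := by
    rw [PySem.Dict.keys_foldl_modify]
    exact pvSet_update_of_subset hmem
  have hnd : (labels.foldl (fun d y => d.modify y 0 (· + 1)) pvD0).keys.Nodup := by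
    rw [hkeys]; decide
  rw [PySem.Dict.items_eq_map_keys _ hnd 0, hkeys]
  apply List.map_congr_left
  intro k hk
  rw [PySem.Dict.getD_foldl_modify_add_one]
  have h0 : pvD0.getD k 0 = 0 := by fin_cases hk <;> decide
  rw [h0, zero_add]

-- componentwise: each sieve stage's length is a label count
theorem pvCount_policy (L : List String) :
    (L.map pvLabelL).count "policy" = (L.filter pvM1).length := by
  induction L with
  | nil => rfl
  | cons q L ih =>
      by_cases h1 : pvM1 q
      · have hb : (pvLabelL q == "policy") = true := by unfold pvLabelL; split_ifs <;> simp_all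
        simp [List.count_cons, List.filter_cons, h1, hb, ih]
      · have hb : (pvLabelL q == "policy") = false := by
          unfold pvLabelL; split_ifs <;> simp_all
        simp [List.count_cons, List.filter_cons, h1, hb, ih]

theorem pvCount_technical (L : List String) :
    (L.map pvLabelL).count "technical" = ((L.filter (fun q => !pvM1 q)).filter pvM2).length := by
  induction L with
  | nil => rfl
  | cons q L ih =>
      by_cases h1 : pvM1 q
      · have hb : (pvLabelL q == "technical") = false := by unfold pvLabelL; split_ifs <;> simp_all
        simp [List.count_cons, List.filter_cons, h1, hb, ih]
      · by_cases h2 : pvM2 q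
        · have hb : (pvLabelL q == "technical") = true := by unfold pvLabelL; split_ifs <;> simp_all
          simp [List.count_cons, List.filter_cons, h1, h2, hb, ih]
        · have hb : (pvLabelL q == "technical") = false := by
            unfold pvLabelL; split_ifs <;> simp_all
          simp [List.count_cons, List.filter_cons, h1, h2, hb, ih]

theorem pvCount_fundamental (L : List String) :
    (L.map pvLabelL).count "fundamental" =
      (((L.filter (fun q => !pvM1 q)).filter (fun q => !pvM2 q)).filter pvM3).length := by
  induction L with
  | nil => rfl
  | cons q L ih =>
      by_cases h1 : pvM1 q
      · have hb : (pvLabelL q == "fundamental") = false := by unfold pvLabelL; split_ifs <;> simp_all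
        simp [List.count_cons, List.filter_cons, h1, hb, ih]
      · by_cases h2 : pvM2 q
        · have hb : (pvLabelL q == "fundamental") = false := by unfold pvLabelL; split_ifs <;> simp_all
          simp [List.count_cons, List.filter_cons, h1, h2, hb, ih]
        · by_cases h3 : pvM3 q
          · have hb : (pvLabelL q == "fundamental") = true := by unfold pvLabelL; split_ifs <;> simp_all
            simp [List.count_cons, List.filter_cons, h1, h2, h3, hb, ih]
          · have hb : (pvLabelL q == "fundamental") = false := by
              unfold pvLabelL; split_ifs <;> simp_all
            simp [List.count_cons, List.filter_cons, h1, h2, h3, hb, ih]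

theorem pvCount_positioning (L : List String) :
    (L.map pvLabelL).count "positioning" =
      ((((L.filter (fun q => !pvM1 q)).filter (fun q => !pvM2 q)).filter (fun q => !pvM3 q)).filter pvM4).length := by
  induction L with
  | nil => rfl
  | cons q L ih =>
      by_cases h1 : pvM1 q
      · have hb : (pvLabelL q == "positioning") = false := by unfold pvLabelL; split_ifs <;> simp_all
        simp [List.count_cons, List.filter_cons, h1, hb, ih]
      · by_cases h2 : pvM2 q
        · have hb : (pvLabelL q == "positioning") = false := by unfold pvLabelL; split_ifs <;> simp_all
          simp [List.count_cons, List.filter_cons, h1, h2, hb, ih]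
        · by_cases h3 : pvM3 q
          · have hb : (pvLabelL q == "positioning") = false := by unfold pvLabelL; split_ifs <;> simp_all
            simp [List.count_cons, List.filter_cons, h1, h2, h3, hb, ih]
          · by_cases h4 : pvM4 q
            · have hb : (pvLabelL q == "positioning") = true := by unfold pvLabelL; split_ifs <;> simp_all
              simp [List.count_cons, List.filter_cons, h1, h2, h3, h4, hb, ih]
            · have hb : (pvLabelL q == "positioning") = false := by
                unfold pvLabelL; split_ifs <;> simp_all
              simp [List.count_cons, List.filter_cons, h1, h2, h3, h4, hb, ih]

theorem pvCount_risk (L : List String) :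
    (L.map pvLabelL).count "risk" =
      (((((L.filter (fun q => !pvM1 q)).filter (fun q => !pvM2 q)).filter (fun q => !pvM3 q)).filter (fun q => !pvM4 q)).filter pvM5).length := by
  induction L with
  | nil => rfl
  | cons q L ih =>
      by_cases h1 : pvM1 q
      · have hb : (pvLabelL q == "risk") = false := by unfold pvLabelL; split_ifs <;> simp_all
        simp [List.count_cons, List.filter_cons, h1, hb, ih]
      · by_cases h2 : pvM2 q
        · have hb : (pvLabelL q == "risk") = false := by unfold pvLabelL; split_ifs <;> simp_all
          simp [List.count_cons, List.filter_cons, h1, h2, hb, ih]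
        · by_cases h3 : pvM3 q
          · have hb : (pvLabelL q == "risk") = false := by unfold pvLabelL; split_ifs <;> simp_all
            simp [List.count_cons, List.filter_cons, h1, h2, h3, hb, ih]
          · by_cases h4 : pvM4 q
            · have hb : (pvLabelL q == "risk") = false := by unfold pvLabelL; split_ifs <;> simp_all
              simp [List.count_cons, List.filter_cons, h1, h2, h3, h4, hb, ih]
            · by_cases h5 : pvM5 q
              · have hb : (pvLabelL q == "risk") = true := by unfold pvLabelL; split_ifs <;> simp_all
                simp [List.count_cons, List.filter_cons, h1, h2, h3, h4, h5, hb, ih]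
              · have hb : (pvLabelL q == "risk") = false := by
                  unfold pvLabelL; split_ifs <;> simp_all
                simp [List.count_cons, List.filter_cons, h1, h2, h3, h4, h5, hb, ih]

theorem pvCount_other (L : List String) :
    (L.map pvLabelL).count "other" =
      (((((L.filter (fun q => !pvM1 q)).filter (fun q => !pvM2 q)).filter (fun q => !pvM3 q)).filter (fun q => !pvM4 q)).filter (fun q => !pvM5 q)).length := by
  induction L with
  | nil => rfl
  | cons q L ih =>
      by_cases h1 : pvM1 q
      · have hb : (pvLabelL q == "other") = false := by unfold pvLabelL; split_ifs <;> simp_all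
        simp [List.count_cons, List.filter_cons, h1, hb, ih]
      · by_cases h2 : pvM2 q
        · have hb : (pvLabelL q == "other") = false := by unfold pvLabelL; split_ifs <;> simp_all
          simp [List.count_cons, List.filter_cons, h1, h2, hb, ih]
        · by_cases h3 : pvM3 q
          · have hb : (pvLabelL q == "other") = false := by unfold pvLabelL; split_ifs <;> simp_all
            simp [List.count_cons, List.filter_cons, h1, h2, h3, hb, ih]
          · by_cases h4 : pvM4 q
            · have hb : (pvLabelL q == "other") = false := by unfold pvLabelL; split_ifs <;> simp_all
              simp [List.count_cons, List.filter_cons, h1, h2, h3, h4, hb, ih]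
            · by_cases h5 : pvM5 q
              · have hb : (pvLabelL q == "other") = false := by unfold pvLabelL; split_ifs <;> simp_all
                simp [List.count_cons, List.filter_cons, h1, h2, h3, h4, h5, hb, ih]
              · have hb : (pvLabelL q == "other") = true := by unfold pvLabelL; split_ifs <;> simp_all
                simp [List.count_cons, List.filter_cons, h1, h2, h3, h4, h5, hb, ih]

-- the sieve over the concrete table computes exactly the per-name label counts
theorem pvSieve_canon (L : List String) :
    pvSieve pvTable L =
      pvCategoryNames.map (fun k => (k, ((L.map pvLabelL).count k : Int))) := by
  show [("policy", ((L.filter pvM1).length : Int)),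
        ("technical", (((L.filter (fun q => !pvM1 q)).filter pvM2).length : Int)),
        ("fundamental", ((((L.filter (fun q => !pvM1 q)).filter (fun q => !pvM2 q)).filter pvM3).length : Int)),
        ("positioning", (((((L.filter (fun q => !pvM1 q)).filter (fun q => !pvM2 q)).filter (fun q => !pvM3 q)).filter pvM4).length : Int)),
        ("risk", ((((((L.filter (fun q => !pvM1 q)).filter (fun q => !pvM2 q)).filter (fun q => !pvM3 q)).filter (fun q => !pvM4 q)).filter pvM5).length : Int)),
        ("other", ((((((L.filter (fun q => !pvM1 q)).filter (fun q => !pvM2 q)).filter (fun q => !pvM3 q)).filter (fun q => !pvM4 q)).filter (fun q => !pvM5 q)).length : Int))] =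
      pvCategoryNames.map (fun k => (k, ((L.map pvLabelL).count k : Int)))
  simp only [pvCategoryNames, List.map_cons, List.map_nil,
    pvCount_policy, pvCount_technical, pvCount_fundamental,
    pvCount_positioning, pvCount_risk, pvCount_other]

-- ===== VERDICT (by name: the statement is the Claim_ definition above) =====
theorem categorize_questions_py_spec : Claim_equal_categorize_questions_py := by
  intro questions _
  show categorize_questions_py questions = categorize_questions_py_alt questions
  rw [pvA_canon]
  unfold categorize_questions_py_alt
  rw [pvSieve_canon]
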